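-- pv_equiv track=rewrite | github.com/KhacThien88/SideProject1-BackEnd | app/services/job_description_parser.py | _find_skills_section
-- ===== SOURCE A (Python) =====
-- from typing import Dict, List, Any, Optional, Tuple
--
-- def _find_skills_section(text: str) -> Optional[str]:
--     """Find skills section in text"""
--     skills_keywords = [
--         'required skills', 'technical skills', 'must have',
--         'qualifications', 'requirements', 'proficiency in',
--         'experience with', 'knowledge of'
--     ]
--
--     lines = text.split('\n')
--     skills_section = []
--     in_skills_section = False
--
--     for line in lines:
--         line = line.strip()
--         if not line:
--             continue
--
--         # Check if we're entering skills section
--         for keyword in skills_keywords: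
--             if keyword.lower() in line.lower():
--                 in_skills_section = True
--                 break
--
--         if in_skills_section:
--             # Check if we're leaving skills section
--             if any(word in line.lower() for word in ['benefits', 'compensation', 'about', 'company']):
--                 break
--             skills_section.append(line)
--
--     return '\n'.join(skills_section) if skills_section else None
-- ===== SOURCE B (Python) =====
-- def _find_skills_section(text):
--     """Find skills section in text"""
--     skills_keywords = [
--         'required skills', 'technical skills', 'must have',
--         'qualifications', 'requirements', 'proficiency in',
--         'experience with', 'knowledge of'
--     ]
--     exit_words = ['benefits', 'compensation', 'about', 'company']
--
--     # One backwards pass: coll is the run of lines from here up to (not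
--     # including) the next exit line; section ends as coll at the earliest
--     # keyword line.
--     section = None
--     coll = []
--     for raw in reversed(text.split('\n')):
--         line = raw.strip()
--         if not line:
--             continue
--         low = line.lower()
--         coll = [] if any(w in low for w in exit_words) else [line] + coll
--         if any(kw in low for kw in skills_keywords):
--             section = coll
--     return '\n'.join(section) if section else None
-- ===== Notes on version B (the rewrite author's own statement) =====
-- stated objective: alternative
-- what changed: Replaces A's forward stateful scan with an in_skills_section flag and break by a single backwards (right-to-left) pass over the lines that maintains a pair (best section so far, collected run up to the next exit line), overwriting the answer at each keyword line so the earliest one wins; no flag and no break remain.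
import Mathlib
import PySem

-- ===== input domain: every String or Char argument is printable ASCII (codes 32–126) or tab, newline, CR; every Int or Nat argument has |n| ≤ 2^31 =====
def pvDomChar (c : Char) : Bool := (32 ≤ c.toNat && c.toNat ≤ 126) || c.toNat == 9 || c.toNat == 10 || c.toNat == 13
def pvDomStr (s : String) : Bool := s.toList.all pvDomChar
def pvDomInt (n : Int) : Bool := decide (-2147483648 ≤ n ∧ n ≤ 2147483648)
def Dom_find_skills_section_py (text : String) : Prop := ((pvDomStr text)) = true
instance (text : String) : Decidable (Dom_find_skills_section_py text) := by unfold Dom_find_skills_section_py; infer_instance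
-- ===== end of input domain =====

-- B replaces A's forward flag-driven scan with break by one backwards pass keeping a
-- (best section, collected run up to the next exit line) pair (objective: alternative; same cost).

-- ===== PORT A =====
def aSkillsKeywords : List String :=
  ["required skills", "technical skills", "must have",
   "qualifications", "requirements", "proficiency in",
   "experience with", "knowledge of"]

def aExitWords : List String := ["benefits", "compensation", "about", "company"]

-- the for-loop over lines, with the break returning the accumulator
def aLoop : List String → List String → Bool → List String
  | [], acc, _ => acc
  | l :: rest, acc, inSec =>
      let line := PySem.Str.strip l
      if line = "" then aLoop rest acc inSec
      else
        -- inner for-loop over keywords with break = any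
        let inSec' := if aSkillsKeywords.any
            (fun kw => PySem.Str.isIn (PySem.Str.lower kw) (PySem.Str.lower line)) then true else inSec
        if inSec' then
          if aExitWords.any (fun w => PySem.Str.isIn w (PySem.Str.lower line)) then acc
          else aLoop rest (acc ++ [line]) true
        else aLoop rest acc inSec'

def find_skills_section_py (text : String) : Option String :=
  let ss := aLoop ((PySem.Str.split? text "\n").getD []) [] false
  if ss = [] then none else some (PySem.Str.join "\n" ss)

-- ===== PORT B =====
def bSkillsKeywords : List String :=
  ["required skills", "technical skills", "must have",
   "qualifications", "requirements", "proficiency in",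
   "experience with", "knowledge of"]

def bExitWords : List String := ["benefits", "compensation", "about", "company"]

-- one step of B's backwards loop; the state is (section, coll).
-- 'for raw in reversed(lines)' with state = a right fold over the lines.
def bStep (raw : String) (st : Option (List String) × List String) :
    Option (List String) × List String :=
  let line := PySem.Str.strip raw
  if line = "" then st
  else
    let low := PySem.Str.lower line
    let coll := if bExitWords.any (fun w => PySem.Str.isIn w low) then [] else line :: st.2
    let sec := if bSkillsKeywords.any (fun kw => PySem.Str.isIn kw low) then some coll else st.1
    (sec, coll)

def find_skills_section_py_alt (text : String) : Option String :=
  let st := (((PySem.Str.split? text "\n").getD [])).foldr bStep (none, [])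
  match st.1 with
  | none => none
  | some [] => none          -- '\n'.join(section) if section else None: [] is falsy
  | some sec => some (PySem.Str.join "\n" sec)

-- ===== PRECONDITION & SPEC =====
def Spec_find_skills_section_py (text : String) (out : Option String) : Prop := out = find_skills_section_py_alt text
instance (text : String) (out : Option String) : Decidable (Spec_find_skills_section_py text out) := by unfold Spec_find_skills_section_py; infer_instance

-- ===== CLAIM (what is proved, stated in full; the proofs are below) =====
def Claim_equal_find_skills_section_py : Prop := ∀ (text : String), Dom_find_skills_section_py text → Spec_find_skills_section_py text (find_skills_section_py text)

-- ===== LEMMAS AND PROOFS =====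

def pHasKw (line : String) : Bool :=
  bSkillsKeywords.any (fun kw => PySem.Str.isIn kw (PySem.Str.lower line))

def pHasExit (line : String) : Bool :=
  bExitWords.any (fun w => PySem.Str.isIn w (PySem.Str.lower line))

-- A's keyword test (keyword.lower() in line.lower()) equals the plain test:
-- the keyword literals are already lowercase.
theorem kwEq (line : String) :
    aSkillsKeywords.any (fun kw => PySem.Str.isIn (PySem.Str.lower kw) (PySem.Str.lower line))
      = pHasKw line := by
  simp only [pHasKw, aSkillsKeywords, bSkillsKeywords, List.any_cons, List.any_nil]
  have h1 : PySem.Str.lower "required skills" = "required skills" := by decide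
  have h2 : PySem.Str.lower "technical skills" = "technical skills" := by decide
  have h3 : PySem.Str.lower "must have" = "must have" := by decide
  have h4 : PySem.Str.lower "qualifications" = "qualifications" := by decide
  have h5 : PySem.Str.lower "requirements" = "requirements" := by decide
  have h6 : PySem.Str.lower "proficiency in" = "proficiency in" := by decide
  have h7 : PySem.Str.lower "experience with" = "experience with" := by decide
  have h8 : PySem.Str.lower "knowledge of" = "knowledge of" := by decide
  rw [h1, h2, h3, h4, h5, h6, h7, h8]

theorem exitEq (line : String) :
    aExitWords.any (fun w => PySem.Str.isIn w (PySem.Str.lower line)) = pHasExit line := rfl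

-- the reference "first keyword line, collect until exit" description, on filtered lines
def pCollect : List String → List String
  | [] => []
  | l :: rest => if pHasExit l then [] else l :: pCollect rest

-- A's loop re-expressed on the filtered (stripped, non-empty) lines
def fLoop : List String → Bool → List String
  | [], _ => []
  | l :: rest, inSec =>
      let inSec' := if pHasKw l then true else inSec
      if inSec' then (if pHasExit l then [] else l :: fLoop rest true)
      else fLoop rest inSec'

theorem aLoop_eq_fLoop (ls : List String) : ∀ (acc : List String) (flag : Bool),
    aLoop ls acc flag = acc ++ fLoop ((ls.map PySem.Str.strip).filter (fun s => s ≠ "")) flag := by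
  induction ls with
  | nil => intro acc flag; simp [aLoop, fLoop]
  | cons l rest ih =>
    intro acc flag
    simp only [aLoop, List.map_cons, List.filter_cons]
    by_cases hs : PySem.Str.strip l = ""
    · simp [hs, ih]
    · simp only [hs, kwEq, exitEq, decide_eq_true_eq]
      simp only [if_pos (by exact hs), fLoop]
      by_cases hk : (if pHasKw (PySem.Str.strip l) then true else flag) = true
      · simp only [hk, if_true]
        by_cases he : pHasExit (PySem.Str.strip l) = true
        · simp [he]
        · simp [he, ih]
      · simp [hk, ih]

theorem fLoop_true (fl : List String) : fLoop fl true = pCollect fl := by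
  induction fl with
  | nil => rfl
  | cons l rest ih => simp [fLoop, pCollect, ih]

theorem fLoop_false (fl : List String) :
    (match fl.findIdx? pHasKw with
     | none => none
     | some i =>
        let sec := pCollect (fl.drop i)
        if sec = [] then none else some (PySem.Str.join "\n" sec))
    = (if fLoop fl false = [] then none else some (PySem.Str.join "\n" (fLoop fl false))) := by
  induction fl with
  | nil => simp [fLoop]
  | cons l rest ih =>
    by_cases hk : pHasKw l = true
    · simp only [List.findIdx?_cons, hk, if_true, fLoop, List.drop_zero]
      by_cases he : pHasExit l = true
      · simp [he, pCollect]
      · simp [he, pCollect, fLoop_true]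
    · simp only [List.findIdx?_cons, hk, if_false, Bool.false_eq_true, fLoop]
      cases hfi : rest.findIdx? pHasKw with
      | none => simpa [hfi, hk] using ih
      | some i => simpa [hfi, hk, List.drop_succ_cons] using ih

-- B's fold skips blank lines: it equals the same fold over the filtered lines with strip removed
def gStep (line : String) (st : Option (List String) × List String) :
    Option (List String) × List String :=
  let coll := if pHasExit line then [] else line :: st.2
  (if pHasKw line then some coll else st.1, coll)

theorem foldr_bStep_eq (ls : List String) :
    ls.foldr bStep (none, []) =
      ((ls.map PySem.Str.strip).filter (fun s => s ≠ "")).foldr gStep (none, []) := by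
  induction ls with
  | nil => rfl
  | cons l rest ih =>
    simp only [List.foldr_cons, List.map_cons, List.filter_cons, ih]
    by_cases hs : PySem.Str.strip l = ""
    · simp [bStep, hs]
    · simp [bStep, gStep, hs, pHasKw, pHasExit]

theorem gFold_snd (fl : List String) :
    (fl.foldr gStep (none, [])).2 = pCollect fl := by
  induction fl with
  | nil => rfl
  | cons l rest ih => simp [gStep, pCollect, ih]

theorem gFold_fst (fl : List String) :
    (fl.foldr gStep (none, [])).1 =
      (match fl.findIdx? pHasKw with
       | none => none
       | some i => some (pCollect (fl.drop i))) := by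
  induction fl with
  | nil => rfl
  | cons l rest ih =>
    by_cases hk : pHasKw l = true
    · simp [List.foldr_cons, gStep, hk, List.findIdx?_cons, gFold_snd, pCollect]
    · simp only [List.foldr_cons, gStep, hk, if_false, Bool.false_eq_true, List.findIdx?_cons]
      cases hfi : rest.findIdx? pHasKw with
      | none => simpa [hfi] using ih
      | some i => simpa [hfi, List.drop_succ_cons] using ih

theorem final_match (fl : List String) :
    (if fLoop fl false = [] then none else some (PySem.Str.join "\n" (fLoop fl false)))
      = (match (fl.foldr gStep (none, [])).1 with
         | none => none
         | some [] => none
         | some sec => some (PySem.Str.join "\n" sec)) := by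
  rw [gFold_fst, ← fLoop_false]
  cases hfi : fl.findIdx? pHasKw with
  | none => rfl
  | some i =>
    cases hc : pCollect (fl.drop i) with
    | nil => simp [hc]
    | cons x xs => simp [hc]

-- ===== VERDICT (by name: the statement is the Claim_ definition above) =====
theorem find_skills_section_py_spec : Claim_equal_find_skills_section_py := by
  intro text _
  unfold Spec_find_skills_section_py find_skills_section_py find_skills_section_py_alt
  rw [aLoop_eq_fLoop, List.nil_append, foldr_bStep_eq, final_match]
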